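-- pv_equiv track=rewrite | github.com/Mugamta/Boostcamp_AITech5_CV11 | 2024/04.06/박수영_백준_2304_창고_다각형.py | solution
-- ===== SOURCE A (Python) =====
-- def solution(n, arr):
--     """
--     goal: 기둥들의 위치와 높이가 주어질 때, '가장 작은 창고 다각형의 면적' 구하기
--     note:
--         - 창고에는 '모든 기둥'이 들어가며, 기두의 폭은 모두 1m임
--         - 지붕은 수평 부분과 수직 부분으로 구성, '모두 연결되어야 함'
--         - 지붕의 수평 부분은 '반드시 어떤 기둥의 윗면'과 닿아야 함
--         - 지붕의 수직 부분은 '반드시 어떤 기둥의 옆면'과 닿아야 함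
--         - 지붕의 가장자리는 땅에 닿아야 함
--         - 지붕의 어떤 부분도 '오목하게 들어간 부분'이 없어야 함
--     how:
--         - 큐/스택
--         - 지붕 설계에 필요한 기둥만 찾는 방식으로 구현 >> 이는 스택에 저장
--     """
--     # 왼쪽 면 위치 기준으로 오름차순 정렬
--     arr.sort(key=lambda x: x[0])
--
--     stack, tmp = [], []
--
--     # 지붕 설계에 필요한 기둥 찾기
--     for l_pos, h in arr:
--         if not stack:
--             stack.append([l_pos, h])
--
--         else:
--             # 높이가 같거나 더 높은 기둥이 등장하면
--             # 스택에 값을 추가 및 tmp 초기화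
--             if stack[-1][1] <= h:
--                 stack.append([l_pos, h])
--                 tmp = []
--
--             else:
--                 # tmp에는 스택의 마지막 기둥보다 높이가 낮은 기둥들을 저장
--                 if not tmp:
--                     tmp.append([l_pos, h])
--
--                 else:
--                     # 새로운 기둥이 tmp의 마지막 기둥보다 높이가 높다면
--                     # 오목을 방지하기 위해 tmp의 마지막 기둥을 제거
--                     while tmp:
--                         if tmp[-1][1] <= h: tmp.pop()
--                         else: break
--
--                     tmp.append([l_pos, h])
--
--     # tmp에 남아있는 값을 스택에 추가
--     if tmp: stack.extend(tmp)
--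
--     # 두 기둥 사이 면적 구하기 (왼쪽 면적 기준)
--     min_area = 0
--     for i in range(len(stack) - 1):
--         l1, h1 = stack[i]
--         l2, h2 = stack[i + 1]
--
--         if h2 >= h1:
--             min_area += ((h2 * (l2 - l1)) - (h2 - h1) * (l2 - l1))
--         else:
--             min_area += ((h1 * (l2 - l1)) - ((h1 - h2) * (l2 - (l1 + 1))))
--
--     # 마지막 기둥의 면적을 더함
--     min_area += stack[-1][1]
--
--     return min_area
-- ===== SOURCE B (Python) =====
-- def solution(n, arr):
--     # Two directional sweeps with running-max accumulators instead of
--     # building stack/tmp pillar lists; arr.sort kept for A's in-place mutation.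
--     arr.sort(key=lambda x: x[0])
--     area = 0
--     # left-to-right: each new weak running-max record closes a flat segment
--     # at the previous record's height
--     m = pl = None
--     for l, h in arr:
--         if m is None:
--             m, pl = h, l
--         elif h >= m:
--             area += m * (l - pl)
--             m, pl = h, l
--     # right-to-left: each new strict running-max record adds its own column
--     # plus the interior columns at the previous record's height
--     m = pl = None
--     for l, h in reversed(arr):
--         if m is None:
--             area += h
--             m, pl = h, l
--         elif h > m:
--             area += h + m * (pl - l - 1)
--             m, pl = h, l
--     return area
-- ===== Notes on version B (the rewrite author's own statement) =====
-- stated objective: alternative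
-- what changed: Replaces A's stack/tmp pillar-list construction plus a pairwise area loop over the assembled silhouette by two directional sweeps that keep only a running-max record (height, position) and accumulate the area on the fly: left-to-right over weak records, then right-to-left over strict records.
import Mathlib
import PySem

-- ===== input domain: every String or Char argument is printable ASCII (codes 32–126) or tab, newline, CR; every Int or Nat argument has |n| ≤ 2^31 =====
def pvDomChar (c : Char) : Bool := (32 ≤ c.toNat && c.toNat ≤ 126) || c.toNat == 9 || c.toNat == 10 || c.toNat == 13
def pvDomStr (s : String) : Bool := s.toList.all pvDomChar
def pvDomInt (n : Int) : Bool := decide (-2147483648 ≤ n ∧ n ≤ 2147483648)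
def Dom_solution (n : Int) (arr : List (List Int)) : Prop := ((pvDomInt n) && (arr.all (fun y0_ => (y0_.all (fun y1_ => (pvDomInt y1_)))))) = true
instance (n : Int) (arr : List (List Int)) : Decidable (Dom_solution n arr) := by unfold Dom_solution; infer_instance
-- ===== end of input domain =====

-- B replaces A's stack/tmp silhouette-list construction + pairwise area loop by two
-- directional running-max sweeps accumulating the area on the fly (alternative algorithm,
-- similar cost). Both implementations sort arr in place; the equivalence is about the
-- return value (the sort side effect is identical in A and B).


-- ===== PORT A =====
-- "while tmp: if tmp[-1][1] <= h: tmp.pop() else: break"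
def popTmp (tmp : List (Int × Int)) (h : Int) : List (Int × Int) :=
  if hne : tmp = [] then tmp
  else if (tmp.getLast hne).2 ≤ h then popTmp tmp.dropLast h
  else tmp
termination_by tmp.length
decreasing_by
  have := List.length_pos_of_ne_nil hne
  simp [List.length_dropLast]; omega

-- loop body of "for l_pos, h in arr"; rows that are not [l, h] make Python's unpacking
-- raise ValueError and are outside Pre_
def stepA (st : List (Int × Int) × List (Int × Int)) (r : List Int) :
    List (Int × Int) × List (Int × Int) :=
  match r with
  | [l, h] =>
    match st.1.getLast? with
    | none => (st.1 ++ [(l, h)], st.2)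
    | some top =>
      if top.2 ≤ h then (st.1 ++ [(l, h)], [])
      else if st.2 = [] then (st.1, st.2 ++ [(l, h)])
      else (st.1, popTmp st.2 h ++ [(l, h)])
  | _ => st

-- body of "for i in range(len(stack) - 1)": the two branches of A's area formula
def segArea (p q : Int × Int) : Int :=
  if p.2 ≤ q.2 then q.2 * (q.1 - p.1) - (q.2 - p.2) * (q.1 - p.1)
  else p.2 * (q.1 - p.1) - (p.2 - q.2) * (q.1 - (p.1 + 1))

-- the indexed loop over consecutive pairs stack[i], stack[i+1]
def pairLoop : List (Int × Int) → Int
  | p :: q :: rest => segArea p q + pairLoop (q :: rest)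
  | _ => 0

def solution (n : Int) (arr : List (List Int)) : Int :=
  let s := PySem.List.sorted arr (fun r => r.headD 0) false
  let st := s.foldl stepA ([], [])
  let stack := if st.2 = [] then st.1 else st.1 ++ st.2
  pairLoop stack +
    (match stack.getLast? with   -- stack[-1][1]; empty stack (arr = []) raises, outside Pre_
     | some p => p.2
     | none => 0)

-- ===== PORT B =====
-- left-to-right sweep: weak running-max records close a flat segment
def ascStep (st : Int × Option (Int × Int)) (r : List Int) : Int × Option (Int × Int) :=
  match r with
  | [l, h] =>
    match st.2 with
    | none => (st.1, some (h, l))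
    | some (m, pl) => if m ≤ h then (st.1 + m * (l - pl), some (h, l)) else st
  | _ => st

-- right-to-left sweep: strict running-max records add their own column plus the
-- interior columns at the previous record's height
def descStep (st : Int × Option (Int × Int)) (r : List Int) : Int × Option (Int × Int) :=
  match r with
  | [l, h] =>
    match st.2 with
    | none => (st.1 + h, some (h, l))
    | some (m, pl) => if m < h then (st.1 + h + m * (pl - l - 1), some (h, l)) else st
  | _ => st

def solution_alt (n : Int) (arr : List (List Int)) : Int :=
  let s := PySem.List.sorted arr (fun r => r.headD 0) false
  let a1 := s.foldl ascStep (0, none)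
  (s.reverse.foldl descStep (a1.1, none)).1

-- ===== PRECONDITION & SPEC =====
-- Pre_ excludes exactly the inputs where Python A raises: the empty list (IndexError at
-- stack[-1]) and rows that are not two-element lists (ValueError at "for l_pos, h in arr").
def Pre_solution (n : Int) (arr : List (List Int)) : Prop :=
  arr ≠ [] ∧ ∀ r ∈ arr, r.length = 2
instance (n : Int) (arr : List (List Int)) : Decidable (Pre_solution n arr) := by
  unfold Pre_solution; infer_instance

def pvWitness_solution : Int × List (List Int) := (2, [[3, 1], [0, 2]])

def Spec_solution (n : Int) (arr : List (List Int)) (out : Int) : Prop := out = solution_alt n arr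
instance (n : Int) (arr : List (List Int)) (out : Int) : Decidable (Spec_solution n arr out) := by
  unfold Spec_solution; infer_instance

-- ===== CLAIM (what is proved, stated in full; the proofs are below) =====
def Claim_equal_solution : Prop := ∀ (n : Int) (arr : List (List Int)),
  Dom_solution n arr → Pre_solution n arr → Spec_solution n arr (solution n arr)

-- ===== LEMMAS AND PROOFS =====

-- pair-level twins of the three loop bodies (the ports destructure the row first)
def stepP (st : List (Int × Int) × List (Int × Int)) (p : Int × Int) :
    List (Int × Int) × List (Int × Int) :=
  match st.1.getLast? with
  | none => (st.1 ++ [p], st.2)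
  | some top =>
    if top.2 ≤ p.2 then (st.1 ++ [p], [])
    else if st.2 = [] then (st.1, st.2 ++ [p])
    else (st.1, popTmp st.2 p.2 ++ [p])

def ascP (st : Int × Option (Int × Int)) (p : Int × Int) : Int × Option (Int × Int) :=
  match st.2 with
  | none => (st.1, some (p.2, p.1))
  | some (m, pl) => if m ≤ p.2 then (st.1 + m * (p.1 - pl), some (p.2, p.1)) else st

def descP (st : Int × Option (Int × Int)) (p : Int × Int) : Int × Option (Int × Int) :=
  match st.2 with
  | none => (st.1 + p.2, some (p.2, p.1))
  | some (m, pl) => if m < p.2 then (st.1 + p.2 + m * (pl - p.1 - 1), some (p.2, p.1)) else st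

def pairOf (r : List Int) : Int × Int := (r.headD 0, r.getD 1 0)

theorem row_eq_of_len2 (r : List Int) (h : r.length = 2) : r = [r.headD 0, r.getD 1 0] := by
  match r, h with
  | [a, b], _ => rfl

theorem foldl_rows_eq {σ : Type} (f : σ → Int × Int → σ) (g : σ → List Int → σ)
    (hfg : ∀ st l h, g st [l, h] = f st (l, h)) :
    ∀ (rows : List (List Int)), (∀ r ∈ rows, r.length = 2) → ∀ st : σ,
      rows.foldl g st = (rows.map pairOf).foldl f st := by
  intro rows
  induction rows with
  | nil => intro _ st; rfl
  | cons r rows ih =>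
    intro hlen st
    have hr := row_eq_of_len2 r (hlen r (by simp))
    simp only [List.foldl_cons, List.map_cons]
    rw [show g st r = f st (pairOf r) by rw [hr]; exact hfg st _ _]
    exact ih (fun r hr => hlen r (by simp [hr])) _

theorem pairLoop_append_singleton :
    ∀ (xs : List (Int × Int)) (hne : xs ≠ []) (y : Int × Int),
      pairLoop (xs ++ [y]) = pairLoop xs + segArea (xs.getLast hne) y := by
  intro xs
  induction xs with
  | nil => intro h; exact absurd rfl h
  | cons a t ih =>
    intro _ y
    cases t with
    | nil => simp [pairLoop]
    | cons b t' =>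
      have := ih (by simp) y
      simp only [List.cons_append, pairLoop] at *
      rw [this]
      simp [List.getLast]
      ring

theorem pairLoop_append :
    ∀ (xs ys : List (Int × Int)) (hne : xs ≠ []),
      pairLoop (xs ++ ys) = pairLoop xs + pairLoop (xs.getLast hne :: ys) := by
  intro xs
  induction xs with
  | nil => intro ys h; exact absurd rfl h
  | cons a t ih =>
    intro ys _
    cases t with
    | nil => simp [pairLoop, List.getLast]
    | cons b t' =>
      have := ih ys (by simp)
      simp only [List.cons_append, pairLoop] at *
      rw [this]
      simp [List.getLast]
      ring

theorem descP_skip :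
    ∀ (u : List (Int × Int)) (a m pl : Int), (∀ p ∈ u, p.2 ≤ m) →
      u.foldl descP (a, some (m, pl)) = (a, some (m, pl)) := by
  intro u
  induction u with
  | nil => intro a m pl _; rfl
  | cons p u ih =>
    intro a m pl hle
    have h1 : p.2 ≤ m := hle p (by simp)
    simp only [List.foldl_cons, descP]
    rw [if_neg (by omega)]
    exact ih a m pl (fun q hq => hle q (by simp [hq]))

theorem descP_state (ast : Int × Option (Int × Int)) (p : Int × Int) :
    ∃ a' M l', descP ast p = (a', some (M, l')) ∧ p.2 ≤ M := by
  obtain ⟨a, st⟩ := ast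
  cases st with
  | none => exact ⟨a + p.2, p.2, p.1, rfl, le_refl _⟩
  | some q =>
    obtain ⟨m, pl⟩ := q
    by_cases h : m < p.2
    · exact ⟨a + p.2 + m * (pl - p.1 - 1), p.2, p.1, by simp [descP, h], le_refl _⟩
    · exact ⟨a, m, pl, by simp [descP, h], by omega⟩

theorem popTmp_spec : ∀ (tmp : List (Int × Int)) (h : Int),
    ∃ dropped, tmp = popTmp tmp h ++ dropped ∧ ∀ p ∈ dropped, p.2 ≤ h := by
  intro tmp h
  induction tmp using popTmp.induct h with
  | case1 => exact ⟨[], by rw [popTmp]; simp, by simp⟩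
  | case2 tmp hne hle ih =>
    obtain ⟨dropped, hd, hdle⟩ := ih
    refine ⟨dropped ++ [tmp.getLast hne], ?_, ?_⟩
    · rw [popTmp.eq_def, dif_neg hne, if_pos hle, ← List.append_assoc, ← hd,
        List.dropLast_append_getLast hne]
    · intro p hp
      rcases List.mem_append.mp hp with h' | h'
      · exact hdle p h'
      · simp at h'; rw [h']; exact hle
  | case3 tmp hne hgt => exact ⟨[], by rw [popTmp.eq_def, dif_neg hne, if_neg hgt]; simp, by simp⟩

theorem popTmp_last : ∀ (tmp : List (Int × Int)) (h : Int),
    ∀ p ∈ (popTmp tmp h).getLast?, h < p.2 := by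
  intro tmp h
  induction tmp using popTmp.induct h with
  | case1 => rw [popTmp]; simp
  | case2 tmp hne hle ih =>
    rw [popTmp.eq_def, dif_neg hne, if_pos hle]
    exact ih
  | case3 tmp hne hgt =>
    rw [popTmp.eq_def, dif_neg hne, if_neg hgt]
    intro p hp
    rw [List.getLast?_eq_some_getLast hne, Option.mem_def, Option.some_inj] at hp
    subst hp
    omega

-- the invariant of A's pillar loop, phrased against B's two sweeps
def InvA (s : List (Int × Int)) : Prop :=
  ∃ R lp hp T,
    s.foldl stepP ([], []) = (R ++ [(lp, hp)], T) ∧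
    (∀ p ∈ s, p.2 ≤ hp) ∧
    List.IsChain (fun a b => b.2 < a.2) ((lp, hp) :: T) ∧
    (∀ p ∈ T, p.2 < hp) ∧
    s.foldl ascP (0, none) = (pairLoop (R ++ [(lp, hp)]), some (hp, lp)) ∧
    (∀ ast : Int × Option (Int × Int),
      s.reverse.foldl descP ast = ((lp, hp) :: T).reverse.foldl descP ast)

theorem invA : ∀ (s : List (Int × Int)), s ≠ [] → InvA s := by
  intro s
  induction s using List.reverseRecOn with
  | nil => intro hF; exact absurd rfl hF
  | append_singleton s x ih =>
    intro _
    obtain ⟨l, h⟩ := x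
    by_cases hs : s = []
    · subst hs
      refine ⟨[], l, h, [], by simp [stepP], by simp, by simp, by simp, ?_, fun ast => rfl⟩
      simp [ascP, pairLoop]
    · obtain ⟨R, lp, hp, T, hfold, hle, hch, hTlt, hasc, hdesc⟩ := ih hs
      have hfold' : (s ++ [(l, h)]).foldl stepP ([], []) = stepP (R ++ [(lp, hp)], T) (l, h) := by
        rw [List.foldl_append, hfold]
        simp only [List.foldl_cons, List.foldl_nil]
      have hrev1 : (s ++ [((l : Int), (h : Int))]).reverse = (l, h) :: s.reverse := by simp
      by_cases hcase : hp ≤ h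
      · -- new weak record: pillar appended to the stack, tmp cleared
        refine ⟨R ++ [(lp, hp)], l, h, [], ?_, ?_, by simp, by simp, ?_, ?_⟩
        · rw [hfold']
          simp only [stepP, List.getLast?_concat]
          rw [if_pos hcase]
        · intro p hp'
          rcases List.mem_append.mp hp' with h' | h'
          · have := hle p h'; omega
          · simp at h'; subst h'; exact le_refl _
        · rw [List.foldl_append, hasc]
          simp only [List.foldl_cons, List.foldl_nil, ascP]
          rw [if_pos hcase,
            pairLoop_append_singleton (R ++ [(lp, hp)]) (by simp) (l, h)]
          have hgl : segArea ((R ++ [(lp, hp)]).getLast (by simp)) (l, h) = hp * (l - lp) := by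
            rw [show (R ++ [(lp, hp)]).getLast (by simp) = (lp, hp) from List.getLast_concat]
            simp only [segArea]
            rw [if_pos hcase]
            ring
          rw [hgl]
        · intro ast
          rw [hrev1, List.foldl_cons, hdesc]
          obtain ⟨a', M, l', hst, hM⟩ := descP_state ast (l, h)
          rw [hst, show ([((l : Int), (h : Int))] : List (Int × Int)).reverse.foldl descP ast
              = descP ast (l, h) by rfl, hst]
          apply descP_skip
          intro p hp'
          rw [List.mem_reverse] at hp'
          rcases List.mem_cons.mp hp' with h' | h'
          · subst h'; simp at hM ⊢; omega
          · have := hTlt p h'; simp at hM; omega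
      · -- lower pillar: goes to tmp after the pops
        push Not at hcase
        obtain ⟨dropped, hdrop, hdle⟩ := popTmp_spec T h
        have hkeepT : ∀ p ∈ popTmp T h, p ∈ T := by
          intro p hp'; rw [hdrop]; exact List.mem_append.mpr (Or.inl hp')
        refine ⟨R, lp, hp, popTmp T h ++ [(l, h)], ?_, ?_, ?_, ?_, ?_, ?_⟩
        · rw [hfold']
          simp only [stepP, List.getLast?_concat]
          rw [if_neg (by omega)]
          by_cases hT : T = []
          · subst hT
            rw [if_pos rfl, show popTmp ([] : List (Int × Int)) h = [] from by rw [popTmp]; simp]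
          · rw [if_neg hT]
        · intro p hp'
          rcases List.mem_append.mp hp' with h' | h'
          · exact hle p h'
          · simp at h'; subst h'; exact le_of_lt hcase
        · rw [show ((lp, hp) : Int × Int) :: (popTmp T h ++ [(l, h)])
              = ((lp, hp) :: popTmp T h) ++ [(l, h)] by simp]
          refine List.isChain_append.mpr ⟨?_, by simp, ?_⟩
          · have hsplit : ((lp, hp) : Int × Int) :: T = ((lp, hp) :: popTmp T h) ++ dropped := by
              rw [List.cons_append, ← hdrop]
            rw [hsplit] at hch
            exact (List.isChain_append.mp hch).1
          · intro p hp' q hq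
            simp only [List.head?_cons, Option.mem_def, Option.some_inj] at hq
            subst hq
            rw [Option.mem_def, List.getLast?_cons, Option.some_inj] at hp'
            subst hp'
            cases hkp : popTmp T h with
            | nil => simpa using hcase
            | cons a u =>
              have hL := popTmp_last T h
              rw [hkp] at hL
              have hne2 : (a :: u : List (Int × Int)) ≠ [] := by simp
              have := hL _ (by rw [List.getLast?_eq_some_getLast hne2]; rfl)
              simpa [List.getLast?_eq_some_getLast hne2] using this
        · intro p hp'
          rcases List.mem_append.mp hp' with h' | h'
          · exact hTlt p (hkeepT p h')
          · simp at h'; subst h'; exact hcase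
        · rw [List.foldl_append, hasc]
          simp only [List.foldl_cons, List.foldl_nil, ascP]
          rw [if_neg (by omega)]
        · intro ast
          rw [hrev1, List.foldl_cons, hdesc]
          obtain ⟨a', M, l', hst, hM⟩ := descP_state ast (l, h)
          have hM' : h ≤ M := by simpa using hM
          have hrevT : (((lp, hp) : Int × Int) :: T).reverse
              = dropped.reverse ++ ((popTmp T h).reverse ++ [(lp, hp)]) := by
            conv_lhs => rw [hdrop]
            simp
          rw [hst, hrevT, List.foldl_append,
            descP_skip dropped.reverse a' M l'
              (fun p hp' => le_trans (hdle p (List.mem_reverse.mp hp')) hM')]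
          rw [show (((lp, hp) : Int × Int) :: (popTmp T h ++ [(l, h)])).reverse
              = (l, h) :: ((popTmp T h).reverse ++ [(lp, hp)]) by simp]
          rw [List.foldl_cons, hst]

theorem desc_chain_some :
    ∀ (c : List (Int × Int)) (z : Int × Int),
      List.IsChain (fun a b => b.2 < a.2) (c ++ [z]) →
      ∀ (a m pl : Int), m < z.2 →
        (c ++ [z]).reverse.foldl descP (a, some (m, pl)) =
          (a + pairLoop (c ++ [z] ++ [(pl, m)]),
           some (((c ++ [z]).headD (0, 0)).2, ((c ++ [z]).headD (0, 0)).1)) := by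
  intro c
  induction c using List.reverseRecOn with
  | nil =>
    intro z hch a m pl hm
    simp only [List.nil_append, List.reverse_cons, List.reverse_nil, List.foldl_cons,
      List.foldl_nil, List.cons_append, pairLoop, segArea, List.headD]
    rw [show descP (a, some (m, pl)) z = (a + z.2 + m * (pl - z.1 - 1), some (z.2, z.1)) by
      simp [descP, hm]]
    rw [if_neg (by omega)]
    simp only [Prod.mk.injEq]
    exact ⟨by ring, by trivial⟩
  | append_singleton c₀ z' ih =>
    intro z hch a m pl hm
    have hbr : z.2 < z'.2 := by
      rcases List.isChain_append.mp hch with ⟨-, -, hb⟩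
      exact hb z' (by simp) z (by simp)
    have hch' : List.IsChain (fun a b => b.2 < a.2) (c₀ ++ [z']) :=
      (List.isChain_append.mp hch).1
    rw [show (c₀ ++ [z'] ++ [z]).reverse = z :: (c₀ ++ [z']).reverse by simp]
    rw [List.foldl_cons,
      show descP (a, some (m, pl)) z = (a + z.2 + m * (pl - z.1 - 1), some (z.2, z.1)) by
        simp [descP, hm],
      ih z' hch' (a + z.2 + m * (pl - z.1 - 1)) z.2 z.1 hbr]
    have h1 : pairLoop (c₀ ++ [z'] ++ [(z.1, z.2)]) = pairLoop (c₀ ++ [z'] ++ [z]) := by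
      simp
    have h2 : pairLoop (c₀ ++ [z'] ++ [z] ++ [(pl, m)]) =
        pairLoop (c₀ ++ [z'] ++ [z]) + segArea z (pl, m) := by
      rw [pairLoop_append_singleton (c₀ ++ [z'] ++ [z]) (by simp) (pl, m)]
      simp
    have h3 : segArea z (pl, m) = z.2 + m * (pl - z.1 - 1) := by
      simp only [segArea]
      rw [if_neg (by simp; omega)]
      ring
    rw [h1, h2, h3]
    simp only [Prod.mk.injEq]
    refine ⟨by ring, by simp⟩

theorem desc_chain_none :
    ∀ (c : List (Int × Int)) (z : Int × Int),
      List.IsChain (fun a b => b.2 < a.2) (c ++ [z]) →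
      ∀ a : Int,
        (c ++ [z]).reverse.foldl descP (a, none) =
          (a + pairLoop (c ++ [z]) + z.2,
           some (((c ++ [z]).headD (0, 0)).2, ((c ++ [z]).headD (0, 0)).1)) := by
  intro c z hch a
  rw [show (c ++ [z]).reverse = z :: c.reverse by simp]
  rw [List.foldl_cons, show descP (a, none) z = (a + z.2, some (z.2, z.1)) from rfl]
  rcases List.eq_nil_or_concat c with hc | ⟨c₀, z', hc⟩
  · subst hc
    simp [pairLoop]
  · rw [List.concat_eq_append] at hc
    subst hc
    have hbr : z.2 < z'.2 := by
      rcases List.isChain_append.mp hch with ⟨-, -, hb⟩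
      exact hb z' (by simp) z (by simp)
    rw [desc_chain_some c₀ z' (List.isChain_append.mp hch).1 (a + z.2) z.2 z.1 hbr]
    have h1 : pairLoop (c₀ ++ [z'] ++ [(z.1, z.2)]) = pairLoop (c₀ ++ [z'] ++ [z]) := by
      simp
    rw [h1]
    simp only [Prod.mk.injEq]
    refine ⟨by ring, by simp⟩

theorem core (s : List (Int × Int)) (hs : s ≠ []) :
    (let st := s.foldl stepP ([], [])
     let stack := if st.2 = [] then st.1 else st.1 ++ st.2
     pairLoop stack + (match stack.getLast? with | some p => p.2 | none => 0))
    = (s.reverse.foldl descP ((s.foldl ascP (0, none)).1, none)).1 := by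
  obtain ⟨R, lp, hp, T, hfold, hle, hch, hTlt, hasc, hdesc⟩ := invA s hs
  simp only [hfold, hasc]
  rw [hdesc]
  by_cases hT : T = []
  · subst hT
    rw [show (((lp, hp) : Int × Int) :: []).reverse.foldl descP
        ((pairLoop (R ++ [(lp, hp)]), some (hp, lp)).1, none)
        = (pairLoop (R ++ [(lp, hp)]) + hp, some (hp, lp)) from rfl]
    simp
  · rw [if_neg hT]
    rcases List.eq_nil_or_concat T with h' | ⟨T₀, zT, h'⟩
    · exact absurd h' hT
    · rw [List.concat_eq_append] at h'
      subst h'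
      have hch' : List.IsChain (fun a b => b.2 < a.2) (((lp, hp) :: T₀) ++ [zT]) := by
        rw [show (((lp, hp) : Int × Int) :: T₀) ++ [zT] = (lp, hp) :: (T₀ ++ [zT]) by simp]
        exact hch
      have hrw : (((lp, hp) : Int × Int) :: (T₀ ++ [zT])).reverse
          = (((lp, hp) :: T₀) ++ [zT]).reverse := by simp
      rw [hrw, desc_chain_none ((lp, hp) :: T₀) zT hch' _]
      rw [pairLoop_append (R ++ [(lp, hp)]) (T₀ ++ [zT]) (by simp)]
      rw [show (R ++ [(lp, hp)]).getLast (by simp) = (lp, hp) from List.getLast_concat]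
      rw [List.getLast?_append, List.getLast?_concat]
      simp

theorem sorted_rows_len2 (arr : List (List Int)) (hlen : ∀ r ∈ arr, r.length = 2) :
    ∀ r ∈ PySem.List.sorted arr (fun r => r.headD 0) false, r.length = 2 :=
  fun r hr => hlen r ((PySem.List.mem_sorted arr (fun r => r.headD 0) false r).mp hr)

-- ===== VERDICT (by name: the statement is the Claim_ definition above) =====
theorem solution_spec : Claim_equal_solution := by
  unfold Claim_equal_solution
  intro n arr _ hpre
  unfold Spec_solution
  obtain ⟨hne, hlen⟩ := hpre
  unfold solution solution_alt
  have hlenS := sorted_rows_len2 arr hlen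
  have hneS : PySem.List.sorted arr (fun r => r.headD 0) false ≠ [] := by
    intro hS
    apply hne
    have hl := PySem.List.length_sorted arr (fun r => r.headD 0) false
    rw [hS] at hl
    exact List.eq_nil_of_length_eq_zero hl.symm
  set s := PySem.List.sorted arr (fun r => r.headD 0) false with hsdef
  have hb1 : s.foldl stepA ([], []) = (s.map pairOf).foldl stepP ([], []) :=
    foldl_rows_eq stepP stepA (fun st l h => rfl) s hlenS _
  have hb2 : s.foldl ascStep (0, none) = (s.map pairOf).foldl ascP (0, none) :=
    foldl_rows_eq ascP ascStep (fun st l h => rfl) s hlenS _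
  have hb3 : ∀ a : Int, s.reverse.foldl descStep (a, none)
      = (s.map pairOf).reverse.foldl descP (a, none) := by
    intro a
    rw [← List.map_reverse]
    exact foldl_rows_eq descP descStep (fun st l h => rfl) s.reverse
      (fun r hr => hlenS r (List.mem_reverse.mp hr)) _
  simp only [hb1, hb2, hb3]
  exact core (s.map pairOf) (by simpa using hneS)
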